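-- pv_equiv track=rewrite | github.com/thanhtranfpt/CSD203 | ok - GRAPH/Find Halmington cycles of a Graph.py | is_Halmington_cycle
-- ===== SOURCE A (Python) =====
-- def is_Halmington_cycle(set_n_edge,listVertices):
--     cost = 0
--     Halmington_cycle = [set_n_edge[0]]
--     for i in range(len(set_n_edge)):
--         doing = Halmington_cycle[-1][-2]
--         for edge in set_n_edge:
--             if edge not in Halmington_cycle and edge[0] == doing:
--                 Halmington_cycle.append(edge)
--                 break
--             else:
--                 continue
--     check = {}
--     for edge in Halmington_cycle:
--         check[edge[0]] = check.get(edge[0],0) + 1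
--         check[edge[1]] = check.get(edge[1], 0) + 1
--     if len(check) != len(listVertices):
--         return False, None, None, check
--     for value in list(check.values()):
--         if value != 2:
--             return False,None,None,check
--     for edge in Halmington_cycle:
--         cost += edge[-1]
--
--     return True, Halmington_cycle,cost,check
-- ===== SOURCE B (Python) =====
-- def is_Halmington_cycle(set_n_edge, listVertices):
--     # O(n) greedy trace: adjacency lists keyed by start vertex (reversed so
--     # the original order is popped from the end), with a used-set for O(1)
--     # duplicate skipping; early break once no edge extends the path.
--     adj = {}
--     for e in set_n_edge:
--         adj.setdefault(e[0], []).append(e)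
--     for lst in adj.values():
--         lst.reverse()
--     first = set_n_edge[0]
--     cycle = [first]
--     used = {first}
--     doing = first[1]
--     for _ in range(len(set_n_edge)):
--         lst = adj.get(doing)
--         nxt = None
--         while lst:
--             e = lst.pop()
--             if e not in used:
--                 nxt = e
--                 break
--         if nxt is None:
--             break
--         cycle.append(nxt)
--         used.add(nxt)
--         doing = nxt[1]
--     check = {}
--     for u, v, _w in cycle:
--         check[u] = check.get(u, 0) + 1
--         check[v] = check.get(v, 0) + 1
--     if len(check) != len(listVertices) or any(c != 2 for c in check.values()):
--         return False, None, None, check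
--     return True, cycle, sum(e[2] for e in cycle), check
-- ===== Notes on version B (the rewrite author's own statement) =====
-- stated objective: faster
-- what changed: A rescans the whole edge list (with a linear 'edge not in cycle' membership test) for every of the n outer iterations; B builds an adjacency dict keyed by start vertex once, pops candidate edges destructively while skipping used ones via a set, and breaks as soon as the path cannot be extended.
import Mathlib
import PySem

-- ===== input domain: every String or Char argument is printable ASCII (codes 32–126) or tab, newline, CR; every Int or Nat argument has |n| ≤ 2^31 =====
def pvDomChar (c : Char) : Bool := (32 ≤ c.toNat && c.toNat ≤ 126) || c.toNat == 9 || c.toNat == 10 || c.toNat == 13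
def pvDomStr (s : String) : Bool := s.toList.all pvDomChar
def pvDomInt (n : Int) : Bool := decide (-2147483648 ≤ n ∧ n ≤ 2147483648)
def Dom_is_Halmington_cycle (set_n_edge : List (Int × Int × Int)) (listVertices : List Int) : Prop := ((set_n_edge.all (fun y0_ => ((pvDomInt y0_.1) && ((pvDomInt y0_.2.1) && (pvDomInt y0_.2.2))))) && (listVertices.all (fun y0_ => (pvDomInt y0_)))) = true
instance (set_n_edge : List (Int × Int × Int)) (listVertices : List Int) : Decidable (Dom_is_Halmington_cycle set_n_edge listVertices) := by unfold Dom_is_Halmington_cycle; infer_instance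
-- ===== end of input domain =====

-- B replaces A's rescans of the whole edge list by an adjacency dict keyed by start vertex
-- with a used-set and destructive pops, and breaks as soon as no edge extends the path.

-- ===== PORT A =====
-- inner loop: 'for edge in set_n_edge: if edge not in cycle and edge[0] == doing: append; break'
def pvA_find (cyc : List (Int × Int × Int)) (doing : Int) :
    List (Int × Int × Int) → Option (Int × Int × Int)
  | [] => none
  | e :: rest => if e ∉ cyc ∧ e.1 = doing then some e else pvA_find cyc doing rest

-- one iteration of A's outer loop: doing = cycle[-1][-2]; scan; append on the first hit
def pvStepA (set_n_edge cyc : List (Int × Int × Int)) : List (Int × Int × Int) :=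
  let doing := (PySem.List.pyGetD cyc (-1) (0, 0, 0)).2.1
  match pvA_find cyc doing set_n_edge with
  | some e => cyc ++ [e]
  | none => cyc

def is_Halmington_cycle (set_n_edge : List (Int × Int × Int)) (listVertices : List Int) :
    Bool × (Option (List (Int × Int × Int))) × Option Int × (List (Int × Int)) :=
  match set_n_edge with
  | [] => (false, none, none, [])  -- Python raises IndexError at set_n_edge[0]; excluded by Pre_
  | e0 :: _ =>
    let cyc := (List.range set_n_edge.length).foldl (fun cyc _ => pvStepA set_n_edge cyc) [e0]
    let check := cyc.foldl (fun d e =>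
        let d1 := d.insert e.1 (d.getD e.1 0 + 1)
        d1.insert e.2.1 (d1.getD e.2.1 0 + 1)) PySem.Dict.empty
    if (PySem.Dict.size check : Int) ≠ PySem.List.len listVertices then
      (false, none, none, check.items)
    else if check.values.any (fun v => v ≠ 2) then  -- A's early-return loop over the values
      (false, none, none, check.items)
    else
      (true, some cyc, some (cyc.foldl (fun c e => c + e.2.2) 0), check.items)

-- ===== PORT B =====
-- Source B reverses each adjacency list once and pops from the END; the port keeps each list in
-- the unreversed (original) order and pops from the FRONT — the same sequence of edges, and
-- the constant-time pop in each language.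
def pvB_next (used : PySem.Set (Int × Int × Int)) :
    List (Int × Int × Int) → Option ((Int × Int × Int) × List (Int × Int × Int))
  | [] => none
  | e :: rest => if e ∈ used then pvB_next used rest else some (e, rest)

def pvB_loop (set_n_edge : List (Int × Int × Int)) : Nat → PySem.Dict Int (List (Int × Int × Int)) →
    PySem.Set (Int × Int × Int) → List (Int × Int × Int) → Int → List (Int × Int × Int)
  | 0, _, _, cyc, _ => cyc
  | fuel + 1, adj, used, cyc, doing =>
    match pvB_next used (adj.getD doing []) with
    | none => cyc  -- break
    | some (e, rest) =>
        pvB_loop set_n_edge fuel (adj.insert doing rest) (PySem.Set.add used e) (cyc ++ [e]) e.2.1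

def is_Halmington_cycle_alt (set_n_edge : List (Int × Int × Int)) (listVertices : List Int) :
    Bool × (Option (List (Int × Int × Int))) × Option Int × (List (Int × Int)) :=
  match set_n_edge with
  | [] => (false, none, none, [])  -- Source B raises IndexError at set_n_edge[0]; excluded by Pre_
  | e0 :: _ =>
    let adj := set_n_edge.foldl (fun d e => d.modify e.1 [] (· ++ [e])) PySem.Dict.empty
    let cyc := pvB_loop set_n_edge set_n_edge.length adj (PySem.Set.add PySem.Set.empty e0) [e0] e0.2.1
    let check := cyc.foldl (fun d e =>
        let d1 := d.insert e.1 (d.getD e.1 0 + 1)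
        d1.insert e.2.1 (d1.getD e.2.1 0 + 1)) PySem.Dict.empty
    if (PySem.Dict.size check : Int) ≠ PySem.List.len listVertices ∨ check.values.any (fun v => v ≠ 2) then
      (false, none, none, check.items)
    else
      (true, some cyc, some ((cyc.map (fun e => e.2.2)).sum), check.items)

-- ===== PRECONDITION & SPEC =====
-- Pre_ excludes only the empty edge list, on which both Pythons raise IndexError at set_n_edge[0].
def Pre_is_Halmington_cycle (set_n_edge : List (Int × Int × Int)) (listVertices : List Int) : Prop :=
  set_n_edge ≠ []
instance (set_n_edge : List (Int × Int × Int)) (listVertices : List Int) : Decidable (Pre_is_Halmington_cycle set_n_edge listVertices) := by unfold Pre_is_Halmington_cycle; infer_instance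

def pvWitness_is_Halmington_cycle : (List (Int × Int × Int)) × List Int :=
  ([(1, 2, 5), (2, 1, 7)], [1, 2])

def Spec_is_Halmington_cycle (set_n_edge : List (Int × Int × Int)) (listVertices : List Int) (out : Bool × (Option (List (Int × Int × Int))) × Option Int × (List (Int × Int))) : Prop := out = is_Halmington_cycle_alt set_n_edge listVertices
instance (set_n_edge : List (Int × Int × Int)) (listVertices : List Int) (out : Bool × (Option (List (Int × Int × Int))) × Option Int × (List (Int × Int))) : Decidable (Spec_is_Halmington_cycle set_n_edge listVertices out) := by unfold Spec_is_Halmington_cycle; infer_instance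

-- ===== CLAIM (what is proved, stated in full; the proofs are below) =====
def Claim_equal_is_Halmington_cycle : Prop := ∀ (set_n_edge : List (Int × Int × Int)) (listVertices : List Int), Dom_is_Halmington_cycle set_n_edge listVertices → Pre_is_Halmington_cycle set_n_edge listVertices → Spec_is_Halmington_cycle set_n_edge listVertices (is_Halmington_cycle set_n_edge listVertices)

-- ===== LEMMAS AND PROOFS =====

-- first element of the list not yet in cyc: common characterisation of both inner scans
def pvFirstNotIn (cyc : List (Int × Int × Int)) : List (Int × Int × Int) → Option (Int × Int × Int)
  | [] => none
  | e :: rest => if e ∈ cyc then pvFirstNotIn cyc rest else some e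

lemma pvA_find_eq_firstNotIn (cyc : List (Int × Int × Int)) (doing : Int)
    (l : List (Int × Int × Int)) :
    pvA_find cyc doing l = pvFirstNotIn cyc (l.filter (fun e => e.1 == doing)) := by
  induction l with
  | nil => rfl
  | cons e rest ih =>
    by_cases hd : e.1 = doing
    · by_cases hm : e ∈ cyc <;>
        simp [pvA_find, pvFirstNotIn, hd, hm, ih]
    · simp [pvA_find, hd, ih]

lemma pvFirstNotIn_append_of_mem (cyc p s : List (Int × Int × Int)) (hp : ∀ e ∈ p, e ∈ cyc) :
    pvFirstNotIn cyc (p ++ s) = pvFirstNotIn cyc s := by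
  induction p with
  | nil => rfl
  | cons e p ih =>
    simp only [List.cons_append, pvFirstNotIn, hp e (by simp), if_true]
    exact ih (fun x hx => hp x (by simp [hx]))

lemma pvFirstNotIn_congr (c1 c2 s : List (Int × Int × Int)) (h : ∀ e, e ∈ c1 ↔ e ∈ c2) :
    pvFirstNotIn c1 s = pvFirstNotIn c2 s := by
  induction s with
  | nil => rfl
  | cons e s ih =>
    by_cases hm : e ∈ c1
    · simp [pvFirstNotIn, hm, (h e).mp hm, ih]
    · have hm2 : e ∉ c2 := fun hx => hm ((h e).mpr hx)
      simp [pvFirstNotIn, hm, hm2]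

lemma pvB_next_some (used : PySem.Set (Int × Int × Int)) (s : List (Int × Int × Int))
    (e : Int × Int × Int) (rest : List (Int × Int × Int))
    (h : pvB_next used s = some (e, rest)) :
    ∃ q, s = q ++ e :: rest ∧ (∀ x ∈ q, x ∈ used) ∧ e ∉ used := by
  induction s generalizing rest with
  | nil => simp [pvB_next] at h
  | cons a s ih =>
    by_cases hm : a ∈ used
    · obtain ⟨q, hq, hqu, heu⟩ := ih rest (by simpa [pvB_next, hm] using h)
      exact ⟨a :: q, by simp [hq], by simpa [hm] using hqu, heu⟩
    · simp only [pvB_next, hm, if_false] at h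
      obtain ⟨rfl, rfl⟩ : a = e ∧ s = rest := by simpa using h
      exact ⟨[], rfl, by simp, hm⟩

lemma pvB_next_eq_firstNotIn (used : PySem.Set (Int × Int × Int)) (s : List (Int × Int × Int)) :
    (pvB_next used s).map Prod.fst = pvFirstNotIn used s := by
  induction s with
  | nil => rfl
  | cons e s ih => by_cases hm : e ∈ used <;> simp [pvB_next, pvFirstNotIn, hm, ih]

-- the adjacency dict after B's build fold holds exactly the filtered edge lists
lemma pvAdj_getD (l : List (Int × Int × Int)) (d : PySem.Dict Int (List (Int × Int × Int))) (u : Int) :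
    (l.foldl (fun d e => d.modify e.1 [] (· ++ [e])) d).getD u [] =
      d.getD u [] ++ l.filter (fun e => e.1 == u) := by
  induction l generalizing d with
  | nil => simp
  | cons e l ih =>
    simp only [List.foldl_cons, ih, PySem.Dict.getD_modify, List.filter_cons]
    by_cases hu : u = e.1 <;> simp [hu, beq_iff_eq]
    · omega

-- the loop invariant relating B's state to A's growing cycle
def pvInv (set_n_edge cyc : List (Int × Int × Int)) (adj : PySem.Dict Int (List (Int × Int × Int)))
    (used : PySem.Set (Int × Int × Int)) (doing : Int) : Prop :=
  doing = (PySem.List.pyGetD cyc (-1) (0, 0, 0)).2.1 ∧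
  (∀ e, e ∈ used ↔ e ∈ cyc) ∧
  (∀ u, ∃ p, p ++ adj.getD u [] = set_n_edge.filter (fun e => e.1 == u) ∧ ∀ e ∈ p, e ∈ used)

lemma pvStepA_stuck (set_n_edge cyc : List (Int × Int × Int))
    (h : pvStepA set_n_edge cyc = cyc) (l : List Nat) :
    l.foldl (fun c _ => pvStepA set_n_edge c) cyc = cyc := by
  induction l with
  | nil => rfl
  | cons a l ih => simpa [h] using ih

-- A's scan equals B's pop under the invariant
lemma pvFind_eq (set_n_edge cyc : List (Int × Int × Int))
    (adj : PySem.Dict Int (List (Int × Int × Int))) (used : PySem.Set (Int × Int × Int))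
    (doing : Int) (hinv : pvInv set_n_edge cyc adj used doing) :
    pvA_find cyc doing set_n_edge = (pvB_next used (adj.getD doing [])).map Prod.fst := by
  obtain ⟨-, hused, hadj⟩ := hinv
  obtain ⟨p, hp, hpu⟩ := hadj doing
  rw [pvA_find_eq_firstNotIn, ← hp,
    pvFirstNotIn_append_of_mem cyc p _ (fun e he => (hused e).mp (hpu e he)),
    pvFirstNotIn_congr cyc used _ (fun e => (hused e).symm), pvB_next_eq_firstNotIn]

lemma pvLoop_eq (set_n_edge : List (Int × Int × Int)) (l : List Nat)
    (cyc adj used doing) (hinv : pvInv set_n_edge cyc adj used doing) :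
    l.foldl (fun c _ => pvStepA set_n_edge c) cyc =
      pvB_loop set_n_edge l.length adj used cyc doing := by
  induction l generalizing cyc adj used doing with
  | nil => rfl
  | cons a l ih =>
    have hfind := pvFind_eq set_n_edge cyc adj used doing hinv
    obtain ⟨hdoing, hused, hadj⟩ := hinv
    simp only [List.foldl_cons, List.length_cons, pvB_loop]
    cases hB : pvB_next used (adj.getD doing []) with
    | none =>
      have hstuck : pvStepA set_n_edge cyc = cyc := by
        simp [pvStepA, ← hdoing, hfind, hB]
      rw [hstuck, pvStepA_stuck set_n_edge cyc hstuck]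
    | some er =>
      obtain ⟨e, rest⟩ := er
      have hstep : pvStepA set_n_edge cyc = cyc ++ [e] := by
        simp [pvStepA, ← hdoing, hfind, hB]
      rw [hstep]
      obtain ⟨q, hq, hqu, heu⟩ := pvB_next_some used _ e rest hB
      refine ih _ _ _ _ ⟨?_, ?_, ?_⟩
      · rw [PySem.List.pyGetD_neg_one_append_singleton]
      · intro x
        simp [PySem.Set.mem_add, hused x, or_comm]
      · intro u
        by_cases hu : u = doing
        · subst hu
          obtain ⟨p, hp, hpu⟩ := hadj u
          refine ⟨p ++ q ++ [e], ?_, ?_⟩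
          · rw [PySem.Dict.getD_insert_self]
            simpa [hq] using hp
          · intro x hx
            rcases (by simpa using hx : x ∈ p ∨ x ∈ q ∨ x = e) with h | h | rfl
            · exact (PySem.Set.mem_add used e x).mpr (Or.inl (hpu x h))
            · exact (PySem.Set.mem_add used e x).mpr (Or.inl (hqu x h))
            · exact (PySem.Set.mem_add used x x).mpr (Or.inr rfl)
        · obtain ⟨p, hp, hpu⟩ := hadj u
          refine ⟨p, ?_, fun x hx => (PySem.Set.mem_add used e x).mpr (Or.inl (hpu x hx))⟩
          rwa [PySem.Dict.getD_insert_of_ne _ _ _ hu]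

-- ===== VERDICT (by name: the statement is the Claim_ definition above) =====
theorem is_Halmington_cycle_spec : Claim_equal_is_Halmington_cycle := by
  intro set_n_edge listVertices _ hpre
  unfold Spec_is_Halmington_cycle
  cases set_n_edge with
  | nil => exact absurd rfl hpre
  | cons e0 tl =>
    simp only [is_Halmington_cycle, is_Halmington_cycle_alt]
    have hinv0 : pvInv (e0 :: tl) [e0]
        ((e0 :: tl).foldl (fun d e => d.modify e.1 [] (· ++ [e])) PySem.Dict.empty)
        (PySem.Set.add PySem.Set.empty e0) e0.2.1 := by
      refine ⟨?_, ?_, ?_⟩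
      · rw [show ([e0] : List (Int × Int × Int)) = [] ++ [e0] from rfl,
          PySem.List.pyGetD_neg_one_append_singleton]
      · intro x
        simp [PySem.Set.empty]
      · intro u
        exact ⟨[], by rw [List.nil_append, pvAdj_getD, PySem.Dict.getD_empty, List.nil_append], by simp⟩
    have hcyc := pvLoop_eq (e0 :: tl) (List.range (e0 :: tl).length) [e0] _ _ _ hinv0
    rw [List.length_range] at hcyc
    rw [hcyc]
    set cyc := pvB_loop (e0 :: tl) (e0 :: tl).length _ _ [e0] e0.2.1 with hc
    set check := cyc.foldl (fun d e =>
        let d1 := d.insert e.1 (d.getD e.1 0 + 1)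
        d1.insert e.2.1 (d1.getD e.2.1 0 + 1)) (PySem.Dict.empty : PySem.Dict Int Int) with hch
    by_cases hs : check.size = listVertices.length
    · by_cases hv : ∃ x ∈ check.values, ¬x = 2
      · simp [PySem.List.len_eq, hs, hv]
      · simp [PySem.List.len_eq, hs, hv, PySem.List.foldl_add cyc (fun e => e.2.2) 0]
    · simp [PySem.List.len_eq, hs]
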